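-- pv_equiv track=rewrite | github.com/Apologise/PythonTrain | 软件激活码.py | func
-- ===== SOURCE A (Python) =====
-- def func(n):
-- 	result = 0
-- 	count = 0
-- 	for k in range(1,n+1):
-- 		for i in range(k):
-- 			result += pow(2, i)
-- 			count +=1
-- 			if count == n:
-- 				return result
-- ===== SOURCE B (Python) =====
-- def func(n):
-- 	# Closed form: the sequence is blocks 2^0 | 2^0,2^1 | 2^0,2^1,2^2 | ...
-- 	# Count the complete blocks (m) and the terms they cover (tri), then sum
-- 	# the geometric series directly with bit-shifts: the m complete blocks
-- 	# contribute 2^(m+1)-2-m and the partial block of r terms contributes 2^r-1.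
-- 	m = 0
-- 	tri = 0
-- 	for k in range(1, n + 1):
-- 		if tri + k > n:
-- 			break
-- 		tri += k
-- 		m = k
-- 	r = n - tri
-- 	return (1 << (m + 1)) - 2 - m + (1 << r) - 1
-- ===== Notes on version B (the rewrite author's own statement) =====
-- stated objective: faster
-- what changed: Replaces the term-by-term double loop (n big-int additions of pow(2,i)) by a closed form: find the number m of complete blocks via the triangular-number inverse (a simple O(sqrt(n)) counting loop) and sum the geometric series directly with two bit-shifts.
-- outside the precondition, e.g. on func(0): A returns None, B returns 0; on func(-1): A returns None, B raises ValueError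
import Mathlib
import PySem

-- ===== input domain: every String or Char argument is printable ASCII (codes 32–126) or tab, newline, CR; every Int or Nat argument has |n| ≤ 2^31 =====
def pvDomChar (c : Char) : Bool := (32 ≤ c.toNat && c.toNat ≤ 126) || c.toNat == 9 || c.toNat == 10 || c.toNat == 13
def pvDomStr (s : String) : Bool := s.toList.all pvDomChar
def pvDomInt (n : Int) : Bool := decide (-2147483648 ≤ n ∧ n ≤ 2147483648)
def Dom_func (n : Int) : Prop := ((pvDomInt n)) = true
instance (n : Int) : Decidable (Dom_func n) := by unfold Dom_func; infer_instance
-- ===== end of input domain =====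

-- B replaces A's term-by-term O(n) double loop by the closed form (triangular-number
-- inverse + geometric-series sums); equivalence is proved for n ≥ 1 (Pre_), where A returns.

-- ===== PORT A =====
-- inner 'for i in range(k)' loop: .inl res = early 'return result', .inr = loop finished
def pvInner : List Int → Int → Int → Int → Sum Int (Int × Int)
  | [], r, c, _ => .inr (r, c)
  | i :: is, r, c, n =>
    -- pow(2, i): every i drawn from range(k) is ≥ 0, so 2 ^ i.toNat is exact here
    if c + 1 = n then .inl (r + 2 ^ i.toNat)
    else pvInner is (r + 2 ^ i.toNat) (c + 1) n

-- outer 'for k in range(1, n+1)' loop; falling off the loop Python returns None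
-- (only reachable for n ≤ 0, excluded by Pre_func): the port returns 0 there
def pvOuter : List Int → Int → Int → Int → Int
  | [], _, _, _ => 0
  | k :: ks, r, c, n =>
    match pvInner (PySem.List.pyRange 0 k 1) r c n with
    | .inl res => res
    | .inr (r', c') => pvOuter ks r' c' n

def func (n : Int) : Int := pvOuter (PySem.List.pyRange 1 (n + 1) 1) 0 0 n

-- ===== PORT B =====
-- the 'for k in range(1, n+1): if tri+k > n: break; tri += k; m = k' loop of Source B
def pvFindLoop (n : Int) : List Int → Int → Int → Int × Int
  | [], m, tri => (m, tri)
  | k :: ks, m, tri =>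
    if tri + k > n then (m, tri) else pvFindLoop n ks k (tri + k)

def func_alt (n : Int) : Int :=
  let p := pvFindLoop n (PySem.List.pyRange 1 (n + 1) 1) 0 0
  let r := n - p.2
  -- 1 << x: exact for x ≥ 0, which holds for both shift counts whenever n ≥ 1 (Pre_)
  (1 <<< (p.1 + 1).toNat) - 2 - p.1 + (1 <<< r.toNat) - 1

-- ===== PRECONDITION & SPEC =====
-- Pre_ excludes n ≤ 0: there A's loop body never runs and A returns None, not an int
def Pre_func (n : Int) : Prop := 1 ≤ n
instance (n : Int) : Decidable (Pre_func n) := by unfold Pre_func; infer_instance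
def pvWitness_func : Int := 5

def Spec_func (n : Int) (out : Int) : Prop := out = func_alt n
instance (n : Int) (out : Int) : Decidable (Spec_func n out) := by unfold Spec_func; infer_instance

-- ===== CLAIM (what is proved, stated in full; the proofs are below) =====
def Claim_equal_func : Prop := ∀ (n : Int), Dom_func n → Pre_func n → Spec_func n (func n)

-- ===== LEMMAS AND PROOFS =====

-- reference value: sum of the first `rem` terms of the sequence, starting inside
-- block of size k (blocks k, k+1, … follow); total = geometric sums
def G (rem k : Nat) : Int :=
  if rem ≤ k then 2 ^ rem - 1
  else if k = 0 then 0
  else (2 ^ k - 1) + G (rem - k) (k + 1)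
termination_by rem
decreasing_by omega

lemma inner_spec (b : Int) : ∀ (a r c n : Int), 0 ≤ a → a ≤ b →
    pvInner (PySem.List.pyRange a b 1) r c n =
      if c < n ∧ n ≤ c + (b - a) then
        Sum.inl (r + 2 ^ (a + n - c).toNat - 2 ^ a.toNat)
      else Sum.inr (r + 2 ^ b.toNat - 2 ^ a.toNat, c + (b - a)) := by
  suffices H : ∀ (k : Nat) (a r c n : Int), 0 ≤ a → a + k = b →
      pvInner (PySem.List.pyRange a b 1) r c n =
        if c < n ∧ n ≤ c + k then
          Sum.inl (r + 2 ^ (a + n - c).toNat - 2 ^ a.toNat)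
        else Sum.inr (r + 2 ^ b.toNat - 2 ^ a.toNat, c + k) by
    intro a r c n ha hab
    have hk : a + ((b - a).toNat : Int) = b := by omega
    have := H (b - a).toNat a r c n ha hk
    rw [this]
    have he : ((b - a).toNat : Int) = b - a := by omega
    rw [he]
  intro k
  induction k with
  | zero =>
    intro a r c n ha hb
    rw [PySem.List.pyRange_one_eq_nil (by omega)]
    rw [if_neg (by push_cast; omega)]
    show Sum.inr (r, c) = _
    have hba : b = a := by omega
    subst hba
    norm_num
  | succ k ih =>
    intro a r c n ha hb
    rw [PySem.List.pyRange_one_cons (by push_cast at hb ⊢; omega)]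
    show (if c + 1 = n then Sum.inl (r + 2 ^ a.toNat)
          else pvInner (PySem.List.pyRange (a + 1) b 1) (r + 2 ^ a.toNat) (c + 1) n) = _
    have hsucc : (a + 1).toNat = a.toNat + 1 := by omega
    by_cases hc : c + 1 = n
    · rw [if_pos hc, if_pos (by push_cast; omega)]
      congr 1
      have hexp : (a + n - c).toNat = a.toNat + 1 := by omega
      rw [hexp, pow_succ]
      ring
    · rw [if_neg hc, ih (a + 1) (r + 2 ^ a.toNat) (c + 1) n (by omega) (by push_cast at hb ⊢; omega)]
      by_cases hcond : c < n ∧ n ≤ c + ((k : Int) + 1)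
      · rw [if_pos (by omega), if_pos (by push_cast; omega)]
        congr 1
        have hexp : (a + 1 + n - (c + 1)).toNat = (a + n - c).toNat := by omega
        rw [hexp, hsucc, pow_succ]
        ring
      · rw [if_neg (by omega), if_neg (by push_cast; omega)]
        rw [hsucc, pow_succ]
        push_cast
        ring_nf

lemma outer_spec (n : Int) : ∀ (k r c : Int), 1 ≤ k → 0 ≤ c → c < n →
    2 * (n - c) ≤ (n + k) * (n - k + 1) →
    pvOuter (PySem.List.pyRange k (n + 1) 1) r c n = r + G (n - c).toNat k.toNat := by
  suffices H : ∀ (j : Nat) (k r c : Int), 1 ≤ k → 0 ≤ c → c < n →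
      2 * (n - c) ≤ (n + k) * (n - k + 1) → k + j = n →
      pvOuter (PySem.List.pyRange k (n + 1) 1) r c n = r + G (n - c).toNat k.toNat by
    intro k r c hk hc hcn hbound
    have hkn : k ≤ n := by
      by_contra hcon
      have h1 : n - k + 1 ≤ 0 := by omega
      have h2 : 0 < n + k := by omega
      nlinarith
    exact H (n - k).toNat k r c hk hc hcn hbound (by omega)
  intro j
  induction j with
  | zero =>
    intro k r c hk hc hcn hbound hkj
    have hkn : k = n := by omega
    rw [PySem.List.pyRange_one_cons (by omega)]
    show (match pvInner (PySem.List.pyRange 0 k 1) r c n with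
          | .inl res => res
          | .inr (r', c') => pvOuter (PySem.List.pyRange (k + 1) (n + 1) 1) r' c' n) = _
    rw [inner_spec k 0 r c n le_rfl (by omega),
      if_pos (by constructor <;> omega)]
    show r + 2 ^ (0 + n - c).toNat - 2 ^ (0 : Int).toNat = _
    rw [G, if_pos (by omega)]
    simp only [Int.toNat_zero, pow_zero, zero_add]
    ring
  | succ j ih =>
    intro k r c hk hc hcn hbound hkj
    rw [PySem.List.pyRange_one_cons (by omega)]
    show (match pvInner (PySem.List.pyRange 0 k 1) r c n with
          | .inl res => res
          | .inr (r', c') => pvOuter (PySem.List.pyRange (k + 1) (n + 1) 1) r' c' n) = _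
    rw [inner_spec k 0 r c n le_rfl (by omega)]
    by_cases hle : n ≤ c + k
    · rw [if_pos ⟨hcn, by omega⟩]
      show r + 2 ^ (0 + n - c).toNat - 2 ^ (0 : Int).toNat = _
      rw [G, if_pos (by omega)]
      simp only [Int.toNat_zero, pow_zero, zero_add]
      ring
    · rw [if_neg (by omega)]
      show pvOuter (PySem.List.pyRange (k + 1) (n + 1) 1)
          (r + 2 ^ k.toNat - 2 ^ (0 : Int).toNat) (c + (k - 0)) n = _
      have hid : (n + (k + 1)) * (n - (k + 1) + 1) = (n + k) * (n - k + 1) - 2 * k := by ring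
      rw [ih (k + 1) (r + 2 ^ k.toNat - 2 ^ (0 : Int).toNat) (c + (k - 0))
        (by omega) (by omega) (by omega) (by linarith) (by omega)]
      conv_rhs => rw [G]
      rw [if_neg (by omega), if_neg (by omega)]
      have h1 : (n - (c + (k - 0))).toNat = (n - c).toNat - k.toNat := by omega
      have h2 : ((k : Int) + 1).toNat = k.toNat + 1 := by omega
      rw [h1, h2]
      simp only [Int.toNat_zero, pow_zero]
      ring

lemma findloop_spec (n : Int) : ∀ (j : Nat) (m tri : Int), 0 ≤ m → 0 ≤ tri →
    2 * tri = m * (m + 1) → (m + 1) + j = n + 1 →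
    (2 ^ ((pvFindLoop n (PySem.List.pyRange (m + 1) (n + 1) 1) m tri).1 + 1).toNat : Int)
      - 2 - (pvFindLoop n (PySem.List.pyRange (m + 1) (n + 1) 1) m tri).1
      + 2 ^ (n - (pvFindLoop n (PySem.List.pyRange (m + 1) (n + 1) 1) m tri).2).toNat - 1
    = 2 ^ (m + 1).toNat - 2 - m + G (n - tri).toNat (m + 1).toNat := by
  intro j
  induction j with
  | zero =>
    intro m tri hm htri hinv hj
    rw [PySem.List.pyRange_one_eq_nil (by omega)]
    show (2 ^ (m + 1).toNat : Int) - 2 - m + 2 ^ (n - tri).toNat - 1 = _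
    rw [G, if_pos (by omega)]
    ring
  | succ j ih =>
    intro m tri hm htri hinv hj
    rw [PySem.List.pyRange_one_cons (by push_cast at hj; omega)]
    have hstep : pvFindLoop n ((m + 1) :: PySem.List.pyRange (m + 1 + 1) (n + 1) 1) m tri
        = if tri + (m + 1) > n then (m, tri)
          else pvFindLoop n (PySem.List.pyRange (m + 1 + 1) (n + 1) 1) (m + 1) (tri + (m + 1)) := rfl
    rw [hstep]
    by_cases hbr : tri + (m + 1) > n
    · rw [if_pos hbr]
      show (2 ^ (m + 1).toNat : Int) - 2 - m + 2 ^ (n - tri).toNat - 1 = _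
      rw [G, if_pos (by omega)]
      ring
    · rw [if_neg hbr]
      have hinv' : 2 * (tri + (m + 1)) = (m + 1) * (m + 1 + 1) := by
        have : (m + 1) * (m + 1 + 1) = m * (m + 1) + 2 * (m + 1) := by ring
        omega
      have := ih (m + 1) (tri + (m + 1)) (by omega) (by omega) hinv' (by push_cast at hj ⊢; omega)
      rw [this]
      have hpow : (2 : Int) ^ (m + 1 + 1).toNat = 2 * 2 ^ (m + 1).toNat := by
        rw [show ((m : Int) + 1 + 1).toNat = (m + 1).toNat + 1 by omega, pow_succ]; ring
      conv_rhs => rw [G]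
      by_cases hr : n - tri ≤ m + 1
      · -- the block consumed here is the last one: n = tri + m + 1
        rw [if_pos (by omega)]
        rw [show (n - (tri + (m + 1))).toNat = 0 by omega]
        rw [G, if_pos (by omega)]
        rw [show (n - tri).toNat = (m + 1).toNat by omega]
        simp only [pow_zero]
        linarith
      · rw [if_neg (by omega), if_neg (by omega)]
        rw [show (n - (tri + (m + 1))).toNat = (n - tri).toNat - (m + 1).toNat by omega,
          show ((m : Int) + 1 + 1).toNat = (m + 1).toNat + 1 by omega]
        have hpow2 : (2 : Int) ^ ((m + 1).toNat + 1) = 2 * 2 ^ (m + 1).toNat := by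
          rw [pow_succ]; ring
        linarith

-- ===== VERDICT (by name: the statement is the Claim_ definition above) =====
theorem func_spec : Claim_equal_func := by
  intro n _ hn
  have hn1 : (1 : Int) ≤ n := hn
  unfold Spec_func
  have hA : func n = G n.toNat 1 := by
    unfold func
    rw [outer_spec n 1 0 0 le_rfl le_rfl (by omega) (by nlinarith)]
    norm_num
  have hB : func_alt n = G n.toNat 1 := by
    have hsh : ∀ k : Nat, ((1 : Nat) <<< k) = 2 ^ k := by
      intro k; simp [Nat.shiftLeft_eq]
    have hdef : func_alt n =
        (1 <<< ((pvFindLoop n (PySem.List.pyRange (0 + 1) (n + 1) 1) 0 0).1 + 1).toNat)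
          - 2 - (pvFindLoop n (PySem.List.pyRange (0 + 1) (n + 1) 1) 0 0).1
          + (1 <<< (n - (pvFindLoop n (PySem.List.pyRange (0 + 1) (n + 1) 1) 0 0).2).toNat) - 1 := by
      norm_num [func_alt]
    have hfl := findloop_spec n n.toNat 0 0 le_rfl le_rfl (by ring) (by omega)
    rw [hdef, hsh, hsh]
    push_cast
    norm_num at hfl ⊢
    linarith
  rw [hA, hB]
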